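-- pv_equiv track=rewrite | github.com/hiisk/Programmers | Level 1/모의고사/모의고사.py | solution
-- ===== SOURCE A (Python) =====
-- def solution(answers):
--     answer = []
--
--     su_1 = [1, 2, 3, 4, 5]
--     su_2 = [2, 1, 2, 3, 2, 4, 2, 5]
--     su_3 = [3, 3, 1, 1, 2, 2, 4, 4, 5, 5]
--     su_1_c = 0
--     su_2_c = 0
--     su_3_c = 0
--
--     for i in range(len(answers)):
--         if answers[i] == su_1[i%5]:
--             su_1_c +=1
--         if answers[i] == su_2[i%8]:
--             su_2_c +=1
--         if answers[i] == su_3[i%10]: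
--             su_3_c +=1
--
--     max_stu = max(su_1_c, su_2_c, su_3_c)
--     if max_stu == su_1_c: answer.append(1)
--     if max_stu == su_2_c: answer.append(2)
--     if max_stu == su_3_c: answer.append(3)
--
--     return answer
-- ===== SOURCE B (Python) =====
-- def solution(answers):
--     PERIOD = 40  # lcm of the three pattern lengths
--     patterns = [[1, 2, 3, 4, 5],
--                 [2, 1, 2, 3, 2, 4, 2, 5],
--                 [3, 3, 1, 1, 2, 2, 4, 4, 5, 5]]
--     pred = [[p[r % len(p)] for r in range(PERIOD)] for p in patterns]
--     freq = {}
--     for i, a in enumerate(answers):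
--         key = (i % PERIOD, a)
--         freq[key] = freq.get(key, 0) + 1
--     scores = [sum(c for (r, a), c in freq.items() if pred[s][r] == a)
--               for s in range(3)]
--     best = max(scores)
--     return [s + 1 for s in range(3) if scores[s] == best]
-- ===== Notes on version B (the rewrite author's own statement) =====
-- stated objective: alternative
-- what changed: Replaces A's fused position-by-position comparison loop with three counters by a histogram algorithm: one pass builds a frequency dict keyed by (position mod 40, answer) (40 = lcm of the pattern lengths), and each student's score is then summed off the histogram against a precomputed period-40 prediction table.
import Mathlib
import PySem

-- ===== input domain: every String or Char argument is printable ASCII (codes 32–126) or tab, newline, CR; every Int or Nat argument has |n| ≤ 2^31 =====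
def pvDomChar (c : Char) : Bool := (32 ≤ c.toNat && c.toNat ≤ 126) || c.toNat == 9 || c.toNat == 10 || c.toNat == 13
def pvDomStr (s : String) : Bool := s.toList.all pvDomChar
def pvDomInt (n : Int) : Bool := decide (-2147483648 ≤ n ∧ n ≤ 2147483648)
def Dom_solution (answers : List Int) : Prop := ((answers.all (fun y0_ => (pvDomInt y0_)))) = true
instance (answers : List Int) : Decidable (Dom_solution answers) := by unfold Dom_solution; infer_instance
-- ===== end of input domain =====

-- B replaces A's fused compare-per-position loop by a histogram algorithm: one pass builds a
-- frequency dict of (position mod 40, answer) pairs (40 = lcm of the pattern lengths), and each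
-- student's score is then read off the histogram against a precomputed period-40 prediction
-- table, independent of the input length in that stage (objective: alternative).

-- ===== PORT A =====
def solution (answers : List Int) : List Int :=
  let su1 : List Int := [1, 2, 3, 4, 5]
  let su2 : List Int := [2, 1, 2, 3, 2, 4, 2, 5]
  let su3 : List Int := [3, 3, 1, 1, 2, 2, 4, 4, 5, 5]
  -- for i in range(len(answers)) with three independent counters; all indexing in range
  let c := (PySem.List.pyRange 0 (answers.length) 1).foldl
    (fun (c : Int × Int × Int) i =>
      (if PySem.List.pyGetD answers i 0 = PySem.List.pyGetD su1 (PySem.Int.mod i 5) 0 then c.1 + 1 else c.1,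
       if PySem.List.pyGetD answers i 0 = PySem.List.pyGetD su2 (PySem.Int.mod i 8) 0 then c.2.1 + 1 else c.2.1,
       if PySem.List.pyGetD answers i 0 = PySem.List.pyGetD su3 (PySem.Int.mod i 10) 0 then c.2.2 + 1 else c.2.2))
    (0, 0, 0)
  let maxStu := max (max c.1 c.2.1) c.2.2
  (if maxStu = c.1 then [(1 : Int)] else []) ++
  (if maxStu = c.2.1 then [(2 : Int)] else []) ++
  (if maxStu = c.2.2 then [(3 : Int)] else [])

-- ===== PORT B =====
def solution_alt (answers : List Int) : List Int :=
  let patterns : List (List Int) :=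
    [[1, 2, 3, 4, 5], [2, 1, 2, 3, 2, 4, 2, 5], [3, 3, 1, 1, 2, 2, 4, 4, 5, 5]]
  -- pred = [[p[r % len(p)] for r in range(40)] for p in patterns]
  let pred : List (List Int) :=
    patterns.map (fun p =>
      (PySem.List.pyRange 0 40 1).map
        (fun r => PySem.List.pyGetD p (PySem.Int.mod r (p.length : Int)) 0))
  -- freq[(i % 40, a)] = freq.get((i % 40, a), 0) + 1
  let freq : PySem.Dict (Int × Int) Int :=
    (PySem.List.enumerate answers 0).foldl
      (fun d ia =>
        d.insert (PySem.Int.mod ia.1 40, ia.2)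
          (d.getD (PySem.Int.mod ia.1 40, ia.2) 0 + 1))
      PySem.Dict.empty
  -- scores = [sum(c for (r, a), c in freq.items() if pred[s][r] == a) for s in range(3)]
  let scores : List Int :=
    (PySem.List.pyRange 0 3 1).map (fun s =>
      ((freq.items.filter (fun q =>
          PySem.List.pyGetD (PySem.List.pyGetD pred s []) q.1.1 0 == q.1.2)).map (·.2)).sum)
  let best := (PySem.List.max? scores (fun x => x)).getD 0
  ((PySem.List.pyRange 0 3 1).filter
      (fun s => PySem.List.pyGetD scores s 0 == best)).map (fun s => s + 1)

-- ===== PRECONDITION & SPEC =====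
def Spec_solution (answers : List Int) (out : List Int) : Prop := out = solution_alt answers
instance (answers : List Int) (out : List Int) : Decidable (Spec_solution answers out) := by unfold Spec_solution; infer_instance

-- ===== CLAIM (what is proved, stated in full; the proofs are below) =====
def Claim_equal_solution : Prop := ∀ (answers : List Int), Dom_solution answers → Spec_solution answers (solution answers)

-- ===== LEMMAS AND PROOFS =====

-- Summing the multiplicities of a counter's items filtered by a key predicate is countP of the keys.
theorem pvHist (xs : List (Int × Int)) (P : Int × Int → Bool) :
    (((PySem.Dict.counter xs).items.filter (fun q => P q.1)).map (·.2)).sum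
      = (xs.countP P : Int) := by
  rw [PySem.Dict.items_counter, List.filter_map, List.map_map]
  have hperm : ((PySem.Set.ofList xs).filter
        ((fun q : (Int × Int) × Int => P q.1) ∘ fun k => (k, (List.count k xs : Int)))).Perm
      (xs.dedup.filter ((fun q : (Int × Int) × Int => P q.1) ∘ fun k => (k, (List.count k xs : Int)))) := by
    refine List.Perm.filter _ ?_
    rw [← PySem.List.dedup_eq_ofList]
    exact (List.perm_ext_iff_of_nodup (PySem.List.nodup_dedup xs) xs.nodup_dedup).2
      (fun a => by rw [PySem.List.mem_dedup, List.mem_dedup])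
  rw [(hperm.map _).sum_eq]
  have hcomp : ((fun q : (Int × Int) × Int => P q.1) ∘ fun k => (k, (List.count k xs : Int))) = P := rfl
  rw [hcomp]
  have : ((·.2) ∘ fun k : Int × Int => (k, (List.count k xs : Int))) =
      (Nat.cast ∘ fun k => List.count k xs) := rfl
  rw [this, ← List.map_map, ← Nat.cast_list_sum]
  have hcnt : (fun k : Int × Int => List.count k xs)
      = (fun k : Int × Int => @List.count _ instBEqOfDecidableEq k xs) := by
    funext k
    simp only [List.count_eq_countP]
    exact List.countP_congr (fun x _ => by
      constructor <;> (intro h; simp only [beq_iff_eq] at h ⊢; exact h))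
  rw [hcnt, List.sum_map_count_dedup_filter_eq_countP]

-- The per-position comparison against pattern p equals the comparison against its period-40 table q.
theorem pvMatch (answers p q : List Int) (n : Int) (LN : Nat) (L : Int) (hL : L = (LN : Int))
    (hdvd : LN ∣ 40)
    (hq : ∀ m : Nat, m < 40 → PySem.List.pyGetD q (m : Int) 0 = PySem.List.pyGetD p ((m % LN : Nat) : Int) 0) :
    (PySem.List.pyRange 0 n 1).countP
        (fun i => decide (PySem.List.pyGetD answers i 0 = PySem.List.pyGetD p (PySem.Int.mod i L) 0))
      = (PySem.List.pyRange 0 n 1).countP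
          (fun i => PySem.List.pyGetD q (PySem.Int.mod i 40) 0 == PySem.List.pyGetD answers i 0) := by
  apply List.countP_congr
  intro i hi
  have h0 : 0 ≤ i := (PySem.List.mem_pyRange_one.1 hi).1
  obtain ⟨k, rfl⟩ : ∃ k : Nat, i = (k : Int) := ⟨i.toNat, (Int.toNat_of_nonneg h0).symm⟩
  have h40 : PySem.Int.mod (k : Int) 40 = ((k % 40 : Nat) : Int) := by
    exact_mod_cast PySem.Int.mod_natCast k 40
  have hLk : PySem.Int.mod (k : Int) L = ((k % LN : Nat) : Int) := by
    rw [hL]; exact PySem.Int.mod_natCast k LN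
  rw [h40, hLk, hq (k % 40) (Nat.mod_lt _ (by norm_num)), Nat.mod_mod_of_dvd k hdvd]
  simp only [decide_eq_true_eq, beq_iff_eq]
  exact eq_comm

-- B's frequency loop is the counter of the mapped key list.
theorem pvFreq (answers : List Int) :
    (PySem.List.enumerate answers 0).foldl
      (fun d ia =>
        d.insert (PySem.Int.mod ia.1 40, ia.2)
          (d.getD (PySem.Int.mod ia.1 40, ia.2) 0 + 1))
      PySem.Dict.empty
    = PySem.Dict.counter
        ((PySem.List.enumerate answers 0).map (fun ia => (PySem.Int.mod ia.1 40, ia.2))) := by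
  rw [← PySem.Dict.foldl_insert_getD_add_one_eq_counter, List.foldl_map]

-- period-40 prediction tables (values of B's `pred`), used by the proofs only
def pvQ1 : List Int := [1,2,3,4,5,1,2,3,4,5,1,2,3,4,5,1,2,3,4,5,1,2,3,4,5,1,2,3,4,5,1,2,3,4,5,1,2,3,4,5]
def pvQ2 : List Int := [2,1,2,3,2,4,2,5,2,1,2,3,2,4,2,5,2,1,2,3,2,4,2,5,2,1,2,3,2,4,2,5,2,1,2,3,2,4,2,5]
def pvQ3 : List Int := [3,3,1,1,2,2,4,4,5,5,3,3,1,1,2,2,4,4,5,5,3,3,1,1,2,2,4,4,5,5,3,3,1,1,2,2,4,4,5,5]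

-- B's score of the student with period-40 table q
def pvCnt (q : List Int) (answers : List Int) : Int :=
  ((PySem.List.pyRange 0 (answers.length) 1).countP
    (fun i => PySem.List.pyGetD q (PySem.Int.mod i 40) 0 == PySem.List.pyGetD answers i 0) : Int)

-- B's output reduced to its three scores
theorem pvB (answers : List Int) :
    solution_alt answers =
      (let s1 := pvCnt pvQ1 answers
       let s2 := pvCnt pvQ2 answers
       let s3 := pvCnt pvQ3 answers
       let best := max (max s1 s2) s3
       ((if best = s1 then [(1 : Int)] else []) ++
        (if best = s2 then [(2 : Int)] else []) ++
        (if best = s3 then [(3 : Int)] else []))) := by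
  simp only [solution_alt]
  rw [pvFreq]
  rw [show (List.map (fun p => (PySem.List.pyRange 0 40 1).map
        (fun r => PySem.List.pyGetD p (PySem.Int.mod r (p.length : Int)) 0))
      ([[1,2,3,4,5],[2,1,2,3,2,4,2,5],[3,3,1,1,2,2,4,4,5,5]] : List (List Int)))
      = [pvQ1, pvQ2, pvQ3] from by decide]
  rw [show PySem.List.pyRange 0 3 1 = ([0,1,2] : List Int) from by decide]
  simp only [List.map_cons, List.map_nil]
  rw [show PySem.List.pyGetD [pvQ1,pvQ2,pvQ3] (0:Int) ([]:List Int) = pvQ1 from rfl,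
      show PySem.List.pyGetD [pvQ1,pvQ2,pvQ3] (1:Int) ([]:List Int) = pvQ2 from rfl,
      show PySem.List.pyGetD [pvQ1,pvQ2,pvQ3] (2:Int) ([]:List Int) = pvQ3 from rfl]
  rw [pvHist _ (fun k : Int × Int => PySem.List.pyGetD pvQ1 k.1 0 == k.2),
      pvHist _ (fun k : Int × Int => PySem.List.pyGetD pvQ2 k.1 0 == k.2),
      pvHist _ (fun k : Int × Int => PySem.List.pyGetD pvQ3 k.1 0 == k.2)]
  simp only [List.countP_map]
  rw [PySem.List.enumerate_eq_map_pyRange answers 0]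
  simp only [List.countP_map]
  have hc : ∀ q : List Int,
      (↑(List.countP
          (((fun k : Int × Int => PySem.List.pyGetD q k.1 0 == k.2) ∘
              fun ia : Int × Int => (PySem.Int.mod ia.1 40, ia.2)) ∘
            fun j : Int => (j, PySem.List.pyGetD answers j 0))
          (PySem.List.pyRange 0 (PySem.List.len answers))) : Int) = pvCnt q answers :=
    fun q => rfl
  rw [hc pvQ1, hc pvQ2, hc pvQ3]
  rw [PySem.List.max?_id_cons]
  simp only [List.foldl_cons, List.foldl_nil, Option.getD_some]
  simp only [List.filter_cons, List.filter_nil]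
  rw [show ∀ a b c : Int, PySem.List.pyGetD [a,b,c] (0:Int) (0:Int) = a from fun _ _ _ => rfl,
      show ∀ a b c : Int, PySem.List.pyGetD [a,b,c] (1:Int) (0:Int) = b from fun _ _ _ => rfl,
      show ∀ a b c : Int, PySem.List.pyGetD [a,b,c] (2:Int) (0:Int) = c from fun _ _ _ => rfl]
  generalize pvCnt pvQ1 answers = s1
  generalize pvCnt pvQ2 answers = s2
  generalize pvCnt pvQ3 answers = s3
  simp only [beq_iff_eq]
  split_ifs <;> first | rfl | omega

-- ===== VERDICT (by name: the statement is the Claim_ definition above) =====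
theorem solution_spec : Claim_equal_solution := by
  intro answers _
  simp only [Spec_solution]
  rw [pvB]
  simp only [solution]
  rw [PySem.List.foldl_prod_mk
        (f := fun s i => if PySem.List.pyGetD answers i 0 = PySem.List.pyGetD ([1,2,3,4,5] : List Int) (PySem.Int.mod i 5) 0 then s + 1 else s)
        (g := fun (s : Int × Int) i =>
          (if PySem.List.pyGetD answers i 0 = PySem.List.pyGetD ([2,1,2,3,2,4,2,5] : List Int) (PySem.Int.mod i 8) 0 then s.1 + 1 else s.1,
           if PySem.List.pyGetD answers i 0 = PySem.List.pyGetD ([3,3,1,1,2,2,4,4,5,5] : List Int) (PySem.Int.mod i 10) 0 then s.2 + 1 else s.2))]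
  rw [PySem.List.foldl_prod_mk
        (f := fun s i => if PySem.List.pyGetD answers i 0 = PySem.List.pyGetD ([2,1,2,3,2,4,2,5] : List Int) (PySem.Int.mod i 8) 0 then s + 1 else s)
        (g := fun s i => if PySem.List.pyGetD answers i 0 = PySem.List.pyGetD ([3,3,1,1,2,2,4,4,5,5] : List Int) (PySem.Int.mod i 10) 0 then s + 1 else s)]
  rw [PySem.List.foldl_ite_add_one, PySem.List.foldl_ite_add_one, PySem.List.foldl_ite_add_one]
  rw [pvMatch answers ([1,2,3,4,5] : List Int) pvQ1 (answers.length) 5 5 (by norm_num) (by norm_num) (by decide)]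
  rw [pvMatch answers ([2,1,2,3,2,4,2,5] : List Int) pvQ2 (answers.length) 8 8 (by norm_num) (by norm_num) (by decide)]
  rw [pvMatch answers ([3,3,1,1,2,2,4,4,5,5] : List Int) pvQ3 (answers.length) 10 10 (by norm_num) (by norm_num) (by decide)]
  simp only [zero_add]
  rw [← pvCnt, ← pvCnt, ← pvCnt]
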